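-- pv_equiv track=rewrite | github.com/cspergel/aqhealth | planning docs/overlay_fhir.py | _identify_care_gaps
-- ===== SOURCE A (Python) =====
-- def _identify_care_gaps(conditions: list, labs: list, vitals: list, age: int) -> list:
--     """Identify care gaps based on conditions, labs, and age."""
--     gaps = []
--     condition_codes = {c["code"] for c in conditions}
--     condition_families = {c["code"][:3] for c in conditions if len(c["code"]) >= 3}
--
--     # Diabetes care gaps
--     if "E11" in condition_families or "E10" in condition_families:
--         has_a1c = any("a1c" in l.get("display", "").lower() or l.get("code") == "4548-4" for l in labs)
--         if not has_a1c:
--             gaps.append({"gap": "HbA1c not documented in last 90 days", "priority": "high", "category": "diabetes"})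
--
--         has_eye = any("eye" in l.get("display", "").lower() or "retinal" in l.get("display", "").lower() for l in labs)
--         if not has_eye:
--             gaps.append({"gap": "Diabetic eye exam not documented", "priority": "medium", "category": "diabetes"})
--
--     # CKD monitoring
--     if "N18" in condition_families:
--         has_egfr = any("gfr" in l.get("display", "").lower() for l in labs)
--         if not has_egfr:
--             gaps.append({"gap": "eGFR not documented in last 90 days (CKD on problem list)", "priority": "high", "category": "renal"})
--
--     # BMI documentation
--     has_bmi = any("bmi" in v.get("display", "").lower() or v.get("code") == "39156-5" for v in vitals)
--     if not has_bmi: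
--         gaps.append({"gap": "BMI not documented — needed for obesity/malnutrition screening", "priority": "medium", "category": "nutrition"})
--
--     # Depression screening for 65+
--     if age >= 65:
--         has_phq = any("phq" in l.get("display", "").lower() for l in labs)
--         if not has_phq:
--             gaps.append({"gap": "Depression screening (PHQ-9) not documented", "priority": "medium", "category": "behavioral"})
--
--     # Annual Wellness Visit / HCC recapture
--     gaps.append({"gap": "Verify all chronic conditions recaptured for current payment year", "priority": "high", "category": "risk_adjustment"})
--
--     return gaps
-- ===== SOURCE B (Python) =====
-- GAP_A1C = {"gap": "HbA1c not documented in last 90 days", "priority": "high", "category": "diabetes"}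
-- GAP_EYE = {"gap": "Diabetic eye exam not documented", "priority": "medium", "category": "diabetes"}
-- GAP_EGFR = {"gap": "eGFR not documented in last 90 days (CKD on problem list)", "priority": "high", "category": "renal"}
-- GAP_BMI = {"gap": "BMI not documented \u2014 needed for obesity/malnutrition screening", "priority": "medium", "category": "nutrition"}
-- GAP_PHQ = {"gap": "Depression screening (PHQ-9) not documented", "priority": "medium", "category": "behavioral"}
-- GAP_RECAPTURE = {"gap": "Verify all chronic conditions recaptured for current payment year", "priority": "high", "category": "risk_adjustment"}
--
--
-- def _identify_care_gaps(conditions: list, labs: list, vitals: list, age: int) -> list: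
--     """Identify care gaps based on conditions, labs, and age (single pass per list)."""
--     families = set()
--     for c in conditions:
--         code = c.get("code", "")
--         if len(code) >= 3:
--             families.add(code[:3])
--
--     has_a1c = has_eye = has_egfr = has_phq = False
--     for l in labs:
--         d = l.get("display", "").lower()
--         if "a1c" in d or l.get("code") == "4548-4":
--             has_a1c = True
--         if "eye" in d or "retinal" in d:
--             has_eye = True
--         if "gfr" in d:
--             has_egfr = True
--         if "phq" in d:
--             has_phq = True
--
--     has_bmi = False
--     for v in vitals:
--         if "bmi" in v.get("display", "").lower() or v.get("code") == "39156-5":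
--             has_bmi = True
--
--     diabetic = "E11" in families or "E10" in families
--     gaps = []
--     if diabetic and not has_a1c:
--         gaps.append(dict(GAP_A1C))
--     if diabetic and not has_eye:
--         gaps.append(dict(GAP_EYE))
--     if "N18" in families and not has_egfr:
--         gaps.append(dict(GAP_EGFR))
--     if not has_bmi:
--         gaps.append(dict(GAP_BMI))
--     if age >= 65 and not has_phq:
--         gaps.append(dict(GAP_PHQ))
--     gaps.append(dict(GAP_RECAPTURE))
--     return gaps
-- ===== Notes on version B (the rewrite author's own statement) =====
-- stated objective: simpler
-- what changed: Replaces A's five independent any()-scans over labs/vitals and the set comprehensions with one accumulating pass per list (flags gathered first, gaps emitted in a flat guard chain from the precomputed flags).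
import Mathlib
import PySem

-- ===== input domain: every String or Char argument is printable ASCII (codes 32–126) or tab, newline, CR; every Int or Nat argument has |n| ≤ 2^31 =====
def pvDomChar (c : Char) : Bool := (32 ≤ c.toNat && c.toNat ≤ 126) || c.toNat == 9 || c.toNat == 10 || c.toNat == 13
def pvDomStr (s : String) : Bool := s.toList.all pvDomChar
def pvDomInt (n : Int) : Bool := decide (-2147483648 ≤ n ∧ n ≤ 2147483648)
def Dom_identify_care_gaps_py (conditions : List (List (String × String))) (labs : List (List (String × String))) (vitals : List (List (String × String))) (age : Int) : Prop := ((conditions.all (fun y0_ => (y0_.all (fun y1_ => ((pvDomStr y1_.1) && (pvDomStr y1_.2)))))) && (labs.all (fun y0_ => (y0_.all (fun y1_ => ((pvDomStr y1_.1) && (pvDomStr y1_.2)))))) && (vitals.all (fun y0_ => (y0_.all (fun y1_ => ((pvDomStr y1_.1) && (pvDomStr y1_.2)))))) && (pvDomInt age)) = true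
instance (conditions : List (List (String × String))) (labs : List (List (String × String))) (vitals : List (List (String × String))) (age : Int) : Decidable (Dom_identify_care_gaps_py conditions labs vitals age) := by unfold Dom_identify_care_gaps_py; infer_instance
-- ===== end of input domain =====

-- B replaces A's five independent any()-scans and set comprehensions by one accumulating pass
-- per input list, then emits the gaps in a flat guard chain (simpler decomposition, same results).
-- Both ports prove equality of the RETURN value; neither Python mutates its arguments.

-- shared helpers: dict lookup (first match) and the six gap records (literal data, used by both ports)
def pvGet (d : List (String × String)) (k : String) : Option String :=
  (PySem.Dict.mk d).get? k

def gapA1c : List (String × String) := [("gap", "HbA1c not documented in last 90 days"), ("priority", "high"), ("category", "diabetes")]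
def gapEye : List (String × String) := [("gap", "Diabetic eye exam not documented"), ("priority", "medium"), ("category", "diabetes")]
def gapEgfr : List (String × String) := [("gap", "eGFR not documented in last 90 days (CKD on problem list)"), ("priority", "high"), ("category", "renal")]
def gapBmi : List (String × String) := [("gap", "BMI not documented — needed for obesity/malnutrition screening"), ("priority", "medium"), ("category", "nutrition")]
def gapPhq : List (String × String) := [("gap", "Depression screening (PHQ-9) not documented"), ("priority", "medium"), ("category", "behavioral")]
def gapRecapture : List (String × String) := [("gap", "Verify all chronic conditions recaptured for current payment year"), ("priority", "high"), ("category", "risk_adjustment")]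

-- ===== PORT A =====
def identify_care_gaps_py (conditions : List (List (String × String))) (labs : List (List (String × String))) (vitals : List (List (String × String))) (age : Int) : List (List (String × String)) :=
  let _condition_codes : PySem.Set String :=
    PySem.Set.ofList (conditions.map (fun c => (pvGet c "code").getD ""))
  let condition_families : PySem.Set String :=
    PySem.Set.ofList ((conditions.filter (fun c => 3 ≤ PySem.Str.len ((pvGet c "code").getD ""))).map
      (fun c => PySem.Str.slice ((pvGet c "code").getD "") none (some 3)))
  let gaps : List (List (String × String)) := []
  let gaps :=
    if PySem.Set.contains condition_families "E11" || PySem.Set.contains condition_families "E10" then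
      let has_a1c := labs.any (fun l => PySem.Str.isIn "a1c" (PySem.Str.lower ((pvGet l "display").getD "")) || (pvGet l "code" == some "4548-4"))
      let gaps := if !has_a1c then gaps ++ [gapA1c] else gaps
      let has_eye := labs.any (fun l => PySem.Str.isIn "eye" (PySem.Str.lower ((pvGet l "display").getD "")) || PySem.Str.isIn "retinal" (PySem.Str.lower ((pvGet l "display").getD "")))
      if !has_eye then gaps ++ [gapEye] else gaps
    else gaps
  let gaps :=
    if PySem.Set.contains condition_families "N18" then
      let has_egfr := labs.any (fun l => PySem.Str.isIn "gfr" (PySem.Str.lower ((pvGet l "display").getD "")))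
      if !has_egfr then gaps ++ [gapEgfr] else gaps
    else gaps
  let has_bmi := vitals.any (fun v => PySem.Str.isIn "bmi" (PySem.Str.lower ((pvGet v "display").getD "")) || (pvGet v "code" == some "39156-5"))
  let gaps := if !has_bmi then gaps ++ [gapBmi] else gaps
  let gaps :=
    if 65 ≤ age then
      let has_phq := labs.any (fun l => PySem.Str.isIn "phq" (PySem.Str.lower ((pvGet l "display").getD "")))
      if !has_phq then gaps ++ [gapPhq] else gaps
    else gaps
  gaps ++ [gapRecapture]

-- ===== PORT B =====
def identify_care_gaps_py_alt (conditions : List (List (String × String))) (labs : List (List (String × String))) (vitals : List (List (String × String))) (age : Int) : List (List (String × String)) :=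
  let families : PySem.Set String := conditions.foldl (fun s c =>
      let code := (pvGet c "code").getD ""
      if 3 ≤ PySem.Str.len code then PySem.Set.add s (PySem.Str.slice code none (some 3)) else s)
    PySem.Set.empty
  let flags : Bool × Bool × Bool × Bool := labs.foldl (fun f l =>
      let d := PySem.Str.lower ((pvGet l "display").getD "")
      (f.1 || (PySem.Str.isIn "a1c" d || (pvGet l "code" == some "4548-4")),
       f.2.1 || (PySem.Str.isIn "eye" d || PySem.Str.isIn "retinal" d),
       f.2.2.1 || PySem.Str.isIn "gfr" d,
       f.2.2.2 || PySem.Str.isIn "phq" d))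
    (false, false, false, false)
  let has_bmi : Bool := vitals.foldl (fun b v =>
      b || (PySem.Str.isIn "bmi" (PySem.Str.lower ((pvGet v "display").getD "")) || (pvGet v "code" == some "39156-5")))
    false
  let diabetic := PySem.Set.contains families "E11" || PySem.Set.contains families "E10"
  (if diabetic && !flags.1 then [gapA1c] else []) ++
  (if diabetic && !flags.2.1 then [gapEye] else []) ++
  (if PySem.Set.contains families "N18" && !flags.2.2.1 then [gapEgfr] else []) ++
  (if !has_bmi then [gapBmi] else []) ++
  (if decide (65 ≤ age) && !flags.2.2.2 then [gapPhq] else []) ++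
  [gapRecapture]

-- ===== PRECONDITION & SPEC =====
-- Pre_ excludes exactly the inputs on which A raises: a condition dict without a "code" key (KeyError).
def Pre_identify_care_gaps_py (conditions : List (List (String × String))) (labs : List (List (String × String))) (vitals : List (List (String × String))) (age : Int) : Prop :=
  (conditions.all (fun c => (pvGet c "code").isSome)) = true
instance (conditions : List (List (String × String))) (labs : List (List (String × String))) (vitals : List (List (String × String))) (age : Int) : Decidable (Pre_identify_care_gaps_py conditions labs vitals age) := by unfold Pre_identify_care_gaps_py; infer_instance

def pvWitness_identify_care_gaps_py : (List (List (String × String))) × (List (List (String × String))) × (List (List (String × String))) × Int :=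
  ([[("code", "E11.9")]], [[("display", "HbA1c"), ("code", "4548-4")]], [], 70)

def Spec_identify_care_gaps_py (conditions : List (List (String × String))) (labs : List (List (String × String))) (vitals : List (List (String × String))) (age : Int) (out : List (List (String × String))) : Prop := out = identify_care_gaps_py_alt conditions labs vitals age
instance (conditions : List (List (String × String))) (labs : List (List (String × String))) (vitals : List (List (String × String))) (age : Int) (out : List (List (String × String))) : Decidable (Spec_identify_care_gaps_py conditions labs vitals age out) := by unfold Spec_identify_care_gaps_py; infer_instance

-- ===== CLAIM (what is proved, stated in full; the proofs are below) =====
def Claim_equal_identify_care_gaps_py : Prop := ∀ (conditions : List (List (String × String))) (labs : List (List (String × String))) (vitals : List (List (String × String))) (age : Int), Dom_identify_care_gaps_py conditions labs vitals age → Pre_identify_care_gaps_py conditions labs vitals age → Spec_identify_care_gaps_py conditions labs vitals age (identify_care_gaps_py conditions labs vitals age)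


-- ===== LEMMAS AND PROOFS =====

-- B's condition pass equals A's filtered-map set comprehension (accumulator-generalised).
theorem families_foldl_eq (conds : List (List (String × String))) (s : PySem.Set String) :
    conds.foldl (fun s c =>
        let code := (pvGet c "code").getD ""
        if 3 ≤ PySem.Str.len code then PySem.Set.add s (PySem.Str.slice code none (some 3)) else s) s
      = ((conds.filter (fun c => 3 ≤ PySem.Str.len ((pvGet c "code").getD ""))).map
          (fun c => PySem.Str.slice ((pvGet c "code").getD "") none (some 3))).foldl PySem.Set.add s := by
  induction conds generalizing s with
  | nil => rfl
  | cons c rest ih =>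
    simp only [List.foldl_cons, List.filter_cons]
    rw [ih]
    by_cases h : 3 ≤ ((pvGet c "code").getD "").length
    · simp [h]
    · simp [h]

-- B's single flag-accumulating pass over labs equals A's four any() scans.
theorem flags_foldl_eq (labs : List (List (String × String))) (f : Bool × Bool × Bool × Bool) :
    labs.foldl (fun f l =>
        let d := PySem.Str.lower ((pvGet l "display").getD "")
        (f.1 || (PySem.Str.isIn "a1c" d || (pvGet l "code" == some "4548-4")),
         f.2.1 || (PySem.Str.isIn "eye" d || PySem.Str.isIn "retinal" d),
         f.2.2.1 || PySem.Str.isIn "gfr" d,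
         f.2.2.2 || PySem.Str.isIn "phq" d)) f
      = (f.1 || labs.any (fun l => PySem.Str.isIn "a1c" (PySem.Str.lower ((pvGet l "display").getD "")) || (pvGet l "code" == some "4548-4")),
         f.2.1 || labs.any (fun l => PySem.Str.isIn "eye" (PySem.Str.lower ((pvGet l "display").getD "")) || PySem.Str.isIn "retinal" (PySem.Str.lower ((pvGet l "display").getD ""))),
         f.2.2.1 || labs.any (fun l => PySem.Str.isIn "gfr" (PySem.Str.lower ((pvGet l "display").getD ""))),
         f.2.2.2 || labs.any (fun l => PySem.Str.isIn "phq" (PySem.Str.lower ((pvGet l "display").getD "")))) := by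
  induction labs generalizing f with
  | nil => simp
  | cons l rest ih =>
    simp only [List.foldl_cons, List.any_cons]
    rw [ih]
    simp [Bool.or_assoc]

-- B's flag-accumulating pass over vitals equals A's any() scan.
theorem bmi_foldl_eq (vitals : List (List (String × String))) (b : Bool) :
    vitals.foldl (fun b v =>
        b || (PySem.Str.isIn "bmi" (PySem.Str.lower ((pvGet v "display").getD "")) || (pvGet v "code" == some "39156-5"))) b
      = (b || vitals.any (fun v => PySem.Str.isIn "bmi" (PySem.Str.lower ((pvGet v "display").getD "")) || (pvGet v "code" == some "39156-5"))) := by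
  induction vitals generalizing b with
  | nil => simp
  | cons v rest ih =>
    simp only [List.foldl_cons, List.any_cons]
    rw [ih]
    simp [Bool.or_assoc]

-- ===== VERDICT (by name: the statement is the Claim_ definition above) =====
theorem identify_care_gaps_py_spec : Claim_equal_identify_care_gaps_py := by
  intro conditions labs vitals age _hdom _hpre
  simp only [Spec_identify_care_gaps_py, identify_care_gaps_py, identify_care_gaps_py_alt]
  rw [families_foldl_eq, flags_foldl_eq, bmi_foldl_eq]
  simp only [PySem.Set.ofList_eq_foldl, PySem.Set.empty, Bool.false_or, Prod.fst, Prod.snd]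
  by_cases hage : 65 ≤ age
  · rw [if_pos hage, decide_eq_true hage]
    rcases Bool.eq_false_or_eq_true (PySem.Set.contains (((conditions.filter (fun c => 3 ≤ PySem.Str.len ((pvGet c "code").getD ""))).map (fun c => PySem.Str.slice ((pvGet c "code").getD "") none (some 3))).foldl PySem.Set.add []) "E11") with h1 | h1 <;>
    rcases Bool.eq_false_or_eq_true (PySem.Set.contains (((conditions.filter (fun c => 3 ≤ PySem.Str.len ((pvGet c "code").getD ""))).map (fun c => PySem.Str.slice ((pvGet c "code").getD "") none (some 3))).foldl PySem.Set.add []) "E10") with h2 | h2 <;>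
    rcases Bool.eq_false_or_eq_true (PySem.Set.contains (((conditions.filter (fun c => 3 ≤ PySem.Str.len ((pvGet c "code").getD ""))).map (fun c => PySem.Str.slice ((pvGet c "code").getD "") none (some 3))).foldl PySem.Set.add []) "N18") with h3 | h3 <;>
    rcases Bool.eq_false_or_eq_true (labs.any (fun l => PySem.Str.isIn "a1c" (PySem.Str.lower ((pvGet l "display").getD "")) || (pvGet l "code" == some "4548-4"))) with h4 | h4 <;>
    rcases Bool.eq_false_or_eq_true (labs.any (fun l => PySem.Str.isIn "eye" (PySem.Str.lower ((pvGet l "display").getD "")) || PySem.Str.isIn "retinal" (PySem.Str.lower ((pvGet l "display").getD "")))) with h5 | h5 <;>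
    rcases Bool.eq_false_or_eq_true (labs.any (fun l => PySem.Str.isIn "gfr" (PySem.Str.lower ((pvGet l "display").getD "")))) with h6 | h6 <;>
    rcases Bool.eq_false_or_eq_true (labs.any (fun l => PySem.Str.isIn "phq" (PySem.Str.lower ((pvGet l "display").getD "")))) with h7 | h7 <;>
    rcases Bool.eq_false_or_eq_true (vitals.any (fun v => PySem.Str.isIn "bmi" (PySem.Str.lower ((pvGet v "display").getD "")) || (pvGet v "code" == some "39156-5"))) with h8 | h8 <;>
    simp only [h1, h2, h3, h4, h5, h6, h7, h8, Bool.false_or, Bool.true_or, Bool.or_false,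
      Bool.or_true, Bool.not_true, Bool.not_false, Bool.true_and, Bool.false_and, Bool.and_true,
      Bool.and_false, if_true, if_false] <;> rfl
  · rw [if_neg hage, decide_eq_false hage]
    rcases Bool.eq_false_or_eq_true (PySem.Set.contains (((conditions.filter (fun c => 3 ≤ PySem.Str.len ((pvGet c "code").getD ""))).map (fun c => PySem.Str.slice ((pvGet c "code").getD "") none (some 3))).foldl PySem.Set.add []) "E11") with h1 | h1 <;>
    rcases Bool.eq_false_or_eq_true (PySem.Set.contains (((conditions.filter (fun c => 3 ≤ PySem.Str.len ((pvGet c "code").getD ""))).map (fun c => PySem.Str.slice ((pvGet c "code").getD "") none (some 3))).foldl PySem.Set.add []) "E10") with h2 | h2 <;>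
    rcases Bool.eq_false_or_eq_true (PySem.Set.contains (((conditions.filter (fun c => 3 ≤ PySem.Str.len ((pvGet c "code").getD ""))).map (fun c => PySem.Str.slice ((pvGet c "code").getD "") none (some 3))).foldl PySem.Set.add []) "N18") with h3 | h3 <;>
    rcases Bool.eq_false_or_eq_true (labs.any (fun l => PySem.Str.isIn "a1c" (PySem.Str.lower ((pvGet l "display").getD "")) || (pvGet l "code" == some "4548-4"))) with h4 | h4 <;>
    rcases Bool.eq_false_or_eq_true (labs.any (fun l => PySem.Str.isIn "eye" (PySem.Str.lower ((pvGet l "display").getD "")) || PySem.Str.isIn "retinal" (PySem.Str.lower ((pvGet l "display").getD "")))) with h5 | h5 <;>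
    rcases Bool.eq_false_or_eq_true (labs.any (fun l => PySem.Str.isIn "gfr" (PySem.Str.lower ((pvGet l "display").getD "")))) with h6 | h6 <;>
    rcases Bool.eq_false_or_eq_true (labs.any (fun l => PySem.Str.isIn "phq" (PySem.Str.lower ((pvGet l "display").getD "")))) with h7 | h7 <;>
    rcases Bool.eq_false_or_eq_true (vitals.any (fun v => PySem.Str.isIn "bmi" (PySem.Str.lower ((pvGet v "display").getD "")) || (pvGet v "code" == some "39156-5"))) with h8 | h8 <;>
    simp only [h1, h2, h3, h4, h5, h6, h7, h8, Bool.false_or, Bool.true_or, Bool.or_false,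
      Bool.or_true, Bool.not_true, Bool.not_false, Bool.true_and, Bool.false_and, Bool.and_true,
      Bool.and_false, if_true, if_false] <;> rfl
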